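-- pv_equiv track=rewrite | github.com/Fidget278/2022-Algorithm-Study | 개인문제/편근형/풍선 터트리기.py | solution
-- ===== SOURCE A (Python) =====
-- def solution(a):
--     ret = [False]*len(a)
--     left, right = float('inf'), float('inf')
--     for i in range(len(a)):
--         if a[i] < left:
--             left = a[i]
--             ret[i] = True
--         if a[-1-i] < right:
--             right = a[-1-i]
--             ret[-1-i] = True
--     return sum(ret)
-- ===== SOURCE B (Python) =====
-- def solution(a):
--     # inclusion-exclusion: strict prefix-record count + strict suffix-record count,
--     # minus 1 iff the global minimum is unique (the only position counted twice)
--     L, m = 0, None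
--     for x in a:
--         if m is None or x < m:
--             L, m = L + 1, x
--     R, m2 = 0, None
--     for x in reversed(a):
--         if m2 is None or x < m2:
--             R, m2 = R + 1, x
--     dup = 1 if m is not None and a.count(m) == 1 else 0
--     return L + R - dup
-- ===== Notes on version B (the rewrite author's own statement) =====
-- stated objective: alternative
-- what changed: Replaces A's boolean mask array (written from both ends and summed) by inclusion-exclusion: count strict prefix records plus strict suffix records and subtract 1 exactly when the global minimum is unique, so no array is allocated.
import Mathlib
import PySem

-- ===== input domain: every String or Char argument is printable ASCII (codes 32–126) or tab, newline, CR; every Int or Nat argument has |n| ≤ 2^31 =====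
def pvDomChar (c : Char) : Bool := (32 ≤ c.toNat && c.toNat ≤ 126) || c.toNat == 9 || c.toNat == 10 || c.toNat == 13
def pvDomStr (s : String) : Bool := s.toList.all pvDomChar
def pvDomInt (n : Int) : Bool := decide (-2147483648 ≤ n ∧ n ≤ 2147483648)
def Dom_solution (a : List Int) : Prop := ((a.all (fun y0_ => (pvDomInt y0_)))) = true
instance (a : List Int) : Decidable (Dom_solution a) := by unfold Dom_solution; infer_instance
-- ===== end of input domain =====

-- B replaces A's boolean mask array by inclusion-exclusion over prefix/suffix records (objective: alternative).

-- ===== PORT A =====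
-- 'x < float("inf")' is modelled by an Option Int accumulator: none = inf, so the comparison is true.
def pvLtO (x : Int) (m : Option Int) : Bool :=
  match m with
  | none => true
  | some v => decide (x < v)

-- one iteration of A's 'for i in range(len(a))' body; within the loop 0 ≤ i < len a,
-- so a[i] = a.getD i 0 and a[-1-i] = a.getD (len-1-i) 0 are exact
def pvStepA (a : List Int) (st : List Bool × Option Int × Option Int) (i : Nat) :
    List Bool × Option Int × Option Int :=
  let n := a.length
  let ret := st.1
  let left := st.2.1
  let right := st.2.2
  let ai := a.getD i 0
  let ret1 := if pvLtO ai left then ret.set i true else ret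
  let left1 := if pvLtO ai left then some ai else left
  let aj := a.getD (n - 1 - i) 0
  let ret2 := if pvLtO aj right then ret1.set (n - 1 - i) true else ret1
  let right1 := if pvLtO aj right then some aj else right
  (ret2, left1, right1)

def solution (a : List Int) : Int :=
  let st := (List.range a.length).foldl (pvStepA a) (List.replicate a.length false, none, none)
  -- sum(ret): the number of True entries, as a Python int
  (st.1.count true : Int)

-- ===== PORT B =====
-- body of both of B's record-counting loops ('if m is None or x < m')
def pvStepB (p : Int × Option Int) (x : Int) : Int × Option Int :=
  match p.2 with
  | none => (p.1 + 1, some x)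
  | some v => if x < v then (p.1 + 1, some x) else p

def solution_alt (a : List Int) : Int :=
  let Lm := a.foldl pvStepB (0, none)
  let Rm := a.reverse.foldl pvStepB (0, none)
  let dup : Int :=
    match Lm.2 with
    | none => 0
    | some v => if PySem.List.count a v == 1 then 1 else 0
  Lm.1 + Rm.1 - dup

-- ===== PRECONDITION & SPEC =====
def Spec_solution (a : List Int) (out : Int) : Prop := out = solution_alt a
instance (a : List Int) (out : Int) : Decidable (Spec_solution a out) := by unfold Spec_solution; infer_instance

-- ===== CLAIM (what is proved, stated in full; the proofs are below) =====
def Claim_equal_solution : Prop := ∀ (a : List Int), Dom_solution a → Spec_solution a (solution a)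

-- ===== LEMMAS AND PROOFS =====

def pvMstep (m : Option Int) (x : Int) : Option Int := if pvLtO x m then some x else m

def pvLmask : Option Int → List Int → List Bool
  | _, [] => []
  | m, x :: xs => pvLtO x m :: pvLmask (pvMstep m x) xs

theorem pvLmask_length (m : Option Int) (l : List Int) : (pvLmask m l).length = l.length := by
  induction l generalizing m with
  | nil => rfl
  | cons x xs ih => simp [pvLmask, ih]

theorem pvLmask_getD (l : List Int) (m : Option Int) (j : Nat) (hj : j < l.length) :
    (pvLmask m l).getD j false = pvLtO (l.getD j 0) ((l.take j).foldl pvMstep m) := by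
  induction l generalizing m j with
  | nil => simp at hj
  | cons x xs ih =>
    cases j with
    | zero => simp [pvLmask]
    | succ j =>
      simp only [pvLmask, List.getD_cons_succ, List.take_succ_cons, List.foldl_cons]
      exact ih (pvMstep m x) j (by simpa using hj)

def pvLp (a : List Int) (j : Nat) : Bool := (pvLmask none a).getD j false
def pvRp (a : List Int) (j : Nat) : Bool := (pvLmask none a.reverse).getD (a.length - 1 - j) false

def pvInv (a : List Int) (t j : Nat) : Bool :=
  (decide (j < t) && pvLp a j) || (decide (a.length - t ≤ j) && pvRp a j)

theorem pvSet_getD (l : List Bool) (i j : Nat) (b : Bool) :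
    (l.set i b).getD j false = if i = j ∧ j < l.length then b else l.getD j false := by
  by_cases hj : j < l.length
  · by_cases hij : i = j
    · subst hij
      simp [List.getD, List.getElem?_set, hj]
    · simp [List.getD, List.getElem?_set, hij, hj]
  · have h1 : (l.set i b).getD j false = false := by
      apply List.getD_eq_default
      simpa using le_of_not_gt hj
    have h2 : l.getD j false = false := List.getD_eq_default _ _ (le_of_not_gt hj)
    simp [h1, h2, hj]

theorem pvReverse_getD (a : List Int) (j : Nat) (hj : j < a.length) :
    a.reverse.getD j 0 = a.getD (a.length - 1 - j) 0 := by
  have h1 : j < a.reverse.length := by simpa using hj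
  rw [List.getD_eq_getElem _ _ h1, List.getD_eq_getElem _ _ (by omega)]
  simp [List.getElem_reverse]

theorem pvAinv (a : List Int) (t : Nat) (ht : t ≤ a.length) :
    ((List.range t).foldl (pvStepA a) (List.replicate a.length false, none, none)).1.length = a.length ∧
    ((List.range t).foldl (pvStepA a) (List.replicate a.length false, none, none)).2.1
      = (a.take t).foldl pvMstep none ∧
    ((List.range t).foldl (pvStepA a) (List.replicate a.length false, none, none)).2.2
      = (a.reverse.take t).foldl pvMstep none ∧
    ∀ j, j < a.length →
      ((List.range t).foldl (pvStepA a) (List.replicate a.length false, none, none)).1.getD j false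
        = pvInv a t j := by
  induction t with
  | zero =>
    refine ⟨by simp, by simp, by simp, ?_⟩
    intro j hj
    have h1 : (List.replicate a.length false).getD j false = false := by
      simp [List.getD_replicate]
    simp only [List.range_zero, List.foldl_nil, h1, pvInv]
    have d2 : decide (a.length ≤ j) = false := by simp; omega
    simp [d2]
  | succ t ih =>
    have htn : t < a.length := ht
    obtain ⟨hlen, hleft, hright, hret⟩ := ih (le_of_lt htn)
    rw [List.range_succ, List.foldl_append, List.foldl_cons, List.foldl_nil]
    set st := (List.range t).foldl (pvStepA a) (List.replicate a.length false, none, none) with hst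
    have hstep : pvStepA a st t =
        (if pvLtO (a.getD (a.length-1-t) 0) st.2.2 then
            (if pvLtO (a.getD t 0) st.2.1 then st.1.set t true else st.1).set (a.length-1-t) true
          else (if pvLtO (a.getD t 0) st.2.1 then st.1.set t true else st.1),
         (if pvLtO (a.getD t 0) st.2.1 then some (a.getD t 0) else st.2.1),
         (if pvLtO (a.getD (a.length-1-t) 0) st.2.2 then some (a.getD (a.length-1-t) 0) else st.2.2)) := rfl
    rw [hstep]
    have hrevlen : a.reverse.length = a.length := by simp
    have hcL : pvLtO (a.getD t 0) st.2.1 = pvLp a t := by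
      rw [hleft, pvLp, pvLmask_getD a none t htn]
    have hcR : pvLtO (a.getD (a.length - 1 - t) 0) st.2.2 = pvRp a (a.length - 1 - t) := by
      have e : a.length - 1 - (a.length - 1 - t) = t := by omega
      rw [hright, pvRp, e, pvLmask_getD a.reverse none t (by omega),
        pvReverse_getD a t htn]
    have hget : a.getD t 0 = a[t] := List.getD_eq_getElem a 0 htn
    have htake : a.take (t+1) = a.take t ++ [a.getD t 0] := by
      rw [List.take_add_one, List.getElem?_eq_getElem htn, hget]
      rfl
    have hgetR : a.reverse.getD t 0 = a.reverse[t]'(by omega) := List.getD_eq_getElem a.reverse 0 (by omega)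
    have htakeR : a.reverse.take (t+1) = a.reverse.take t ++ [a.getD (a.length - 1 - t) 0] := by
      rw [List.take_add_one, List.getElem?_eq_getElem (by omega : t < a.reverse.length),
        ← pvReverse_getD a t htn, hgetR]
      rfl
    refine ⟨?_, ?_, ?_, ?_⟩
    · split_ifs <;> simp [hlen]
    · rw [htake, List.foldl_append, List.foldl_cons, List.foldl_nil, ← hleft, pvMstep]
    · rw [htakeR, List.foldl_append, List.foldl_cons, List.foldl_nil, ← hright, pvMstep]
    · intro j hj
      have hlen1 : (if pvLtO (a.getD t 0) st.2.1 = true then st.1.set t true else st.1).length = a.length := by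
        split_ifs <;> simp [hlen]
      have hv1 : (if pvLtO (a.getD t 0) st.2.1 = true then st.1.set t true else st.1).getD j false
          = ((pvLp a t && decide (j = t)) || pvInv a t j) := by
        by_cases hb : pvLtO (a.getD t 0) st.2.1 = true
        · rw [if_pos hb, pvSet_getD, hret j hj]
          rw [hcL] at hb
          rw [hb]
          by_cases hjt : j = t
          · rw [if_pos ⟨hjt.symm, by omega⟩]
            simp [hjt]
          · rw [if_neg (by intro hc; exact hjt hc.1.symm)]
            simp [hjt]
        · rw [if_neg hb]
          rw [hcL] at hb
          have hb' : pvLp a t = false := by revert hb; cases pvLp a t <;> simp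
          rw [hret j hj, hb']
          simp
      have hv2 : (if pvLtO (a.getD (a.length - 1 - t) 0) st.2.2 = true then
            (if pvLtO (a.getD t 0) st.2.1 = true then st.1.set t true else st.1).set (a.length - 1 - t) true
          else (if pvLtO (a.getD t 0) st.2.1 = true then st.1.set t true else st.1)).getD j false
          = ((pvRp a (a.length - 1 - t) && decide (j = a.length - 1 - t)) ||
             ((pvLp a t && decide (j = t)) || pvInv a t j)) := by
        by_cases hb : pvLtO (a.getD (a.length - 1 - t) 0) st.2.2 = true
        · rw [if_pos hb, pvSet_getD, hv1]
          rw [hcR] at hb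
          rw [hb]
          by_cases hjr : j = a.length - 1 - t
          · rw [if_pos ⟨hjr.symm, by rw [hlen1]; omega⟩]
            simp [hjr]
          · rw [if_neg (by intro hc; exact hjr hc.1.symm)]
            simp [hjr]
        · rw [if_neg hb, hv1]
          rw [hcR] at hb
          have hb' : pvRp a (a.length - 1 - t) = false := by revert hb; cases pvRp a (a.length - 1 - t) <;> simp
          rw [hb']
          simp
      rw [hv2]
      by_cases hjt : j = t <;> by_cases hjr : j = a.length - 1 - t
      · -- j = t = n-1-t
        subst hjt
        rw [← hjr, pvInv, pvInv]
        have d3 : ¬ (a.length - j ≤ j) := by omega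
        have d4 : (a.length - (j+1) ≤ j) := by omega
        simp [d3, d4]
        exact Bool.or_comm _ _
      · -- j = t ≠ n-1-t
        subst hjt
        rw [pvInv, pvInv]
        have d1 : ¬ (j = a.length - 1 - j) := hjr
        have d4 : (a.length - (j+1) ≤ j) ↔ (a.length - j ≤ j) := by omega
        simp [d1, d4]
      · -- j = n-1-t ≠ t
        rw [← hjr, pvInv, pvInv]
        have d2 : (j < t + 1) ↔ (j < t) := by omega
        have d3 : ¬ (a.length - t ≤ j) := by omega
        have d4 : (a.length - (t+1) ≤ j) := by omega
        simp [hjt, d2, d3, d4]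
        exact Bool.or_comm _ _
      · -- neither
        rw [pvInv, pvInv]
        have d2 : (j < t + 1) ↔ (j < t) := by omega
        have d4 : (a.length - (t+1) ≤ j) ↔ (a.length - t ≤ j) := by omega
        simp [hjt, hjr, d2, d4]

theorem pvLtO_mstep (x y : Int) (m : Option Int) :
    pvLtO x (pvMstep m y) = (pvLtO x m && decide (x < y)) := by
  cases m with
  | none => simp [pvMstep, pvLtO]
  | some v =>
    by_cases h : y < v
    · simp [pvMstep, pvLtO, h]
      omega
    · simp [pvMstep, pvLtO, h]
      omega

theorem pvLtO_foldl (x : Int) (l : List Int) (m : Option Int) :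
    pvLtO x (l.foldl pvMstep m) = (pvLtO x m && l.all (fun y => decide (x < y))) := by
  induction l generalizing m with
  | nil => simp
  | cons y ys ih =>
    simp only [List.foldl_cons, ih, pvLtO_mstep, List.all_cons]
    cases pvLtO x m <;> simp

theorem pvMem_take (a : List Int) (j : Nat) (hj : j ≤ a.length) (y : Int) :
    y ∈ a.take j ↔ ∃ k, k < j ∧ a.getD k 0 = y := by
  rw [List.mem_iff_getElem]
  constructor
  · rintro ⟨i, hi, he⟩
    have hi' : i < j := by simp at hi; omega
    refine ⟨i, hi', ?_⟩
    rw [List.getD_eq_getElem a 0 (by omega), ← he, List.getElem_take]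
  · rintro ⟨k, hk, he⟩
    have hk2 : k < a.length := by omega
    refine ⟨k, by simp; omega, ?_⟩
    rw [List.getElem_take, ← List.getD_eq_getElem a 0 hk2, he]

theorem pvMem_take_rev (a : List Int) (j : Nat) (hj : j < a.length) (y : Int) :
    y ∈ a.reverse.take (a.length - 1 - j) ↔ ∃ k, j < k ∧ k < a.length ∧ a.getD k 0 = y := by
  rw [List.mem_iff_getElem]
  constructor
  · rintro ⟨i, hi, he⟩
    have hi' : i < a.length - 1 - j := by simp at hi; omega
    refine ⟨a.length - 1 - i, by omega, by omega, ?_⟩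
    rw [← pvReverse_getD a i (by omega), ← he, List.getElem_take,
      List.getD_eq_getElem _ 0 (by simp; omega)]
  · rintro ⟨k, hk1, hk2, he⟩
    refine ⟨a.length - 1 - k, by simp; omega, ?_⟩
    rw [List.getElem_take, ← List.getD_eq_getElem a.reverse 0 (by simp; omega),
      pvReverse_getD a _ (by omega)]
    have : a.length - 1 - (a.length - 1 - k) = k := by omega
    rw [this, he]

theorem pvLp_iff (a : List Int) (j : Nat) (hj : j < a.length) :
    pvLp a j = true ↔ ∀ k, k < j → a.getD j 0 < a.getD k 0 := by
  rw [pvLp, pvLmask_getD a none j hj, pvLtO_foldl]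
  simp only [pvLtO, Bool.true_and, List.all_eq_true]
  constructor
  · intro h k hk
    exact of_decide_eq_true (h _ ((pvMem_take a j (by omega) _).mpr ⟨k, hk, rfl⟩))
  · intro h y hy
    obtain ⟨k, hk, he⟩ := (pvMem_take a j (by omega) y).mp hy
    exact decide_eq_true (he ▸ h k hk)

theorem pvRp_iff (a : List Int) (j : Nat) (hj : j < a.length) :
    pvRp a j = true ↔ ∀ k, j < k → k < a.length → a.getD j 0 < a.getD k 0 := by
  have h1 : a.length - 1 - j < a.reverse.length := by simp; omega
  rw [pvRp, pvLmask_getD a.reverse none _ h1, pvLtO_foldl,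
    pvReverse_getD a _ (by omega)]
  have e : a.length - 1 - (a.length - 1 - j) = j := by omega
  rw [e]
  simp only [pvLtO, Bool.true_and, List.all_eq_true]
  have elen : a.reverse.length - 1 - (a.length - 1 - j) = j := by simp; omega
  constructor
  · intro h k hk1 hk2
    refine of_decide_eq_true (h _ ?_)
    exact (pvMem_take_rev a j hj _).mpr ⟨k, hk1, hk2, rfl⟩
  · intro h y hy
    obtain ⟨k, hk1, hk2, he⟩ := (pvMem_take_rev a j hj y).mp hy
    exact decide_eq_true (he ▸ h k hk1 hk2)

theorem pvBoth_char (a : List Int) (j : Nat) (hj : j < a.length) :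
    (pvLp a j && pvRp a j) = true ↔
      ∀ k, k < a.length → k ≠ j → a.getD j 0 < a.getD k 0 := by
  rw [Bool.and_eq_true, pvLp_iff a j hj, pvRp_iff a j hj]
  constructor
  · rintro ⟨hL, hR⟩ k hk hne
    rcases Nat.lt_or_ge k j with h | h
    · exact hL k h
    · exact hR k (by omega) hk
  · intro h
    exact ⟨fun k hk => h k (by omega) (by omega), fun k hk1 hk2 => h k hk2 (by omega)⟩

theorem pvFoldMin (l : List Int) (c : Int) :
    ∃ v, l.foldl pvMstep (some c) = some v ∧ (v = c ∨ v ∈ l) ∧ v ≤ c ∧ ∀ y ∈ l, v ≤ y := by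
  induction l generalizing c with
  | nil => exact ⟨c, rfl, Or.inl rfl, le_refl c, by simp⟩
  | cons x xs ih =>
    simp only [List.foldl_cons, pvMstep, pvLtO]
    by_cases h : x < c
    · simp only [decide_eq_true h, if_pos rfl]
      obtain ⟨v, h1, h2, h3, h4⟩ := ih x
      refine ⟨v, by simpa using h1, ?_, by omega, ?_⟩
      · rcases h2 with rfl | hm
        · exact Or.inr (by simp)
        · exact Or.inr (by simp [hm])
      · intro y hy
        rcases List.mem_cons.1 hy with rfl | hm
        · omega
        · exact h4 y hm
    · simp only [decide_eq_false h, Bool.false_eq_true, if_false]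
      obtain ⟨v, h1, h2, h3, h4⟩ := ih c
      refine ⟨v, h1, ?_, h3, ?_⟩
      · rcases h2 with rfl | hm
        · exact Or.inl rfl
        · exact Or.inr (by simp [hm])
      · intro y hy
        rcases List.mem_cons.1 hy with rfl | hm
        · omega
        · exact h4 y hm

theorem pvRmin_spec (a : List Int) (h : a ≠ []) :
    ∃ v, a.foldl pvMstep none = some v ∧ v ∈ a ∧ ∀ y ∈ a, v ≤ y := by
  cases a with
  | nil => exact absurd rfl h
  | cons x xs =>
    simp only [List.foldl_cons]
    have e : pvMstep none x = some x := rfl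
    rw [e]
    obtain ⟨v, h1, h2, h3, h4⟩ := pvFoldMin xs x
    refine ⟨v, h1, ?_, ?_⟩
    · rcases h2 with rfl | hm
      · simp
      · simp [hm]
    · intro y hy
      rcases List.mem_cons.1 hy with rfl | hm
      · omega
      · exact h4 y hm

theorem pvCountP_getD {α : Type} (l : List α) (d : α) (p : α → Bool) :
    l.countP p = (List.range l.length).countP (fun i => p (l.getD i d)) := by
  induction l with
  | nil => simp
  | cons x xs ih =>
    rw [List.length_cons, List.range_succ_eq_map]
    rw [List.countP_cons, List.countP_cons, List.countP_map]
    simp only [List.getD_cons_zero, Function.comp_def, List.getD_cons_succ]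
    rw [ih]

theorem pvCount_or_and {α : Type} (l : List α) (p q : α → Bool) :
    l.countP (fun x => p x || q x) + l.countP (fun x => p x && q x)
      = l.countP p + l.countP q := by
  induction l with
  | nil => rfl
  | cons x xs ih =>
    simp only [List.countP_cons, ih]
    cases p x <;> cases q x <;> simp <;> omega

theorem pvCountP_unique {l : List Nat} {p : Nat → Bool} (hnd : l.Nodup)
    (h : ∀ i ∈ l, ∀ j ∈ l, p i → p j → i = j) :
    l.countP p = if l.any p then 1 else 0 := by
  induction l with
  | nil => rfl
  | cons x xs ih =>
    rw [List.nodup_cons] at hnd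
    by_cases hx : p x
    · have hz : xs.countP p = 0 := by
        rw [List.countP_eq_zero]
        intro y hy hpy
        have := h x (by simp) y (by simp [hy]) hx hpy
        exact hnd.1 (this ▸ hy)
      simp [hx, hz, List.any_cons]
    · have := ih hnd.2 (fun i hi j hj => h i (by simp [hi]) j (by simp [hj]))
      simp [hx, this, List.any_cons]

theorem pvCountP_two {l : List Nat} {p : Nat → Bool} (hnd : l.Nodup)
    {i j : Nat} (hi : i ∈ l) (hj : j ∈ l) (hij : i ≠ j) (hpi : p i) (hpj : p j) :
    2 ≤ l.countP p := by
  induction l with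
  | nil => simp at hi
  | cons x xs ih =>
    rw [List.nodup_cons] at hnd
    rw [List.countP_cons]
    rcases List.mem_cons.1 hi with rfl | hi'
    · rcases List.mem_cons.1 hj with rfl | hj'
      · exact absurd rfl hij
      · simp [hpi]
        exact ⟨j, hj', hpj⟩
    · rcases List.mem_cons.1 hj with rfl | hj'
      · simp [hpj]
        exact ⟨i, hi', hpi⟩
      · have h2 := ih hnd.2 hi' hj'
        omega

theorem pvCount_getD (l : List Bool) :
    l.count true = (List.range l.length).countP (fun i => l.getD i false) := by
  rw [show l.count true = l.countP (fun b => b == true) from rfl, pvCountP_getD l false]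
  apply List.countP_congr
  intro i _
  cases l.getD i false <;> simp

theorem pvCountP_reflect (n : Nat) (q : Nat → Bool) :
    (List.range n).countP q = (List.range n).countP (fun j => q (n - 1 - j)) := by
  have hmap : (List.range n).map (fun j => n - 1 - j) = (List.range n).reverse := by
    apply List.ext_getElem
    · simp
    · intro i h1 h2
      simp [List.getElem_reverse]
  calc (List.range n).countP q = ((List.range n).reverse).countP q := by
        rw [List.countP_reverse]
    _ = ((List.range n).map (fun j => n - 1 - j)).countP q := by rw [hmap]
    _ = (List.range n).countP (fun j => q (n - 1 - j)) := by
        rw [List.countP_map]; rfl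

theorem pvOverlap (a : List Int) :
    (((List.range a.length).countP (fun j => pvLp a j && pvRp a j) : Nat) : Int)
      = (match a.foldl pvMstep none with
         | none => (0 : Int)
         | some v => if PySem.List.count a v == 1 then (1 : Int) else 0) := by
  by_cases hnil : a = []
  · subst hnil
    simp
  · obtain ⟨v, hv1, hv2, hv3⟩ := pvRmin_spec a hnil
    rw [hv1]
    have hcnt : a.count v = (List.range a.length).countP (fun k => a.getD k 0 == v) := by
      rw [show a.count v = a.countP (fun b => b == v) from rfl, pvCountP_getD a 0]
    have hgd : ∀ k, k < a.length → a.getD k 0 ∈ a := by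
      intro k hk
      rw [List.getD_eq_getElem a 0 hk]
      exact List.getElem_mem hk
    obtain ⟨j, hj, he⟩ := List.mem_iff_getElem.1 hv2
    have hejD : a.getD j 0 = v := by rw [List.getD_eq_getElem a 0 hj, he]
    simp only [PySem.List.count_eq]
    by_cases hc : a.count v = 1
    · have hBj : (pvLp a j && pvRp a j) = true := by
        rw [pvBoth_char a j hj]
        intro k hk hne
        have hle : v ≤ a.getD k 0 := hv3 _ (hgd k hk)
        rcases lt_or_eq_of_le hle with hlt | heq
        · omega
        · exfalso
          have h2 : 2 ≤ (List.range a.length).countP (fun k => a.getD k 0 == v) := by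
            refine pvCountP_two (List.nodup_range) (List.mem_range.2 hj)
              (List.mem_range.2 hk) (fun hh => hne (hh.symm ▸ rfl)) ?_ ?_
            · simpa using hejD
            · simpa using heq.symm
          omega
      have huniq : ∀ i ∈ List.range a.length, ∀ k ∈ List.range a.length,
          (pvLp a i && pvRp a i) = true → (pvLp a k && pvRp a k) = true → i = k := by
        intro i hi k hk hpi hpk
        rw [List.mem_range] at hi hk
        by_contra hne
        have h1 := (pvBoth_char a i hi).1 hpi k hk (fun hh => hne hh.symm)
        have h2 := (pvBoth_char a k hk).1 hpk i hi hne
        omega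
      rw [pvCountP_unique (List.nodup_range) huniq]
      have hany : (List.range a.length).any (fun j => pvLp a j && pvRp a j) := by
        rw [List.any_eq_true]
        exact ⟨j, List.mem_range.2 hj, hBj⟩
      rw [if_pos hany]
      simp [hc]
    · have hnone : (List.range a.length).countP (fun j => pvLp a j && pvRp a j) = 0 := by
        rw [List.countP_eq_zero]
        intro i hi hpi
        rw [List.mem_range] at hi
        have hchar := (pvBoth_char a i hi).1 hpi
        -- a.getD i 0 = v
        have hiv : a.getD i 0 = v := by
          by_cases hij : i = j
          · rw [hij, hejD]
          · have h1 := hchar j hj (fun hh => hij hh.symm)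
            have h2 : v ≤ a.getD i 0 := hv3 _ (hgd i hi)
            omega
        have honly : ∀ x, x < a.length → a.getD x 0 = v → x = i := by
          intro x hx hxv
          by_contra hne
          have h1 := hchar x hx hne
          rw [hiv, hxv] at h1
          omega
        have hcount1 : a.count v = 1 := by
          rw [hcnt, pvCountP_unique List.nodup_range]
          · rw [if_pos]
            rw [List.any_eq_true]
            exact ⟨i, List.mem_range.2 hi, by simpa using hiv⟩
          · intro x hx y hy hxv hyv
            rw [List.mem_range] at hx hy
            rw [beq_iff_eq] at hxv hyv
            rw [honly x hx hxv, honly y hy hyv]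
        exact hc hcount1
      rw [hnone]
      simp [hc]

-- B's fold = record count + running minimum
theorem pvFoldB (l : List Int) (c : Int) (m : Option Int) :
    l.foldl pvStepB (c, m) = (c + ((pvLmask m l).count true : Int), l.foldl pvMstep m) := by
  induction l generalizing c m with
  | nil => simp [pvLmask]
  | cons x xs ih =>
    cases m with
    | none =>
      simp [List.foldl_cons, pvStepB, pvLmask, pvMstep, pvLtO, ih]
      ring_nf
    | some v =>
      by_cases h : x < v
      · simp [List.foldl_cons, pvStepB, pvLmask, pvMstep, pvLtO, h, ih]
        ring_nf
      · simp [List.foldl_cons, pvStepB, pvLmask, pvMstep, pvLtO, h, ih]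

theorem pvMain (a : List Int) : solution a = solution_alt a := by
  obtain ⟨hlen, hleft, hright, hret⟩ := pvAinv a a.length (le_refl _)
  have hA : solution a =
      (((List.range a.length).countP (fun j => pvLp a j || pvRp a j) : Nat) : Int) := by
    show ((((List.range a.length).foldl (pvStepA a)
        (List.replicate a.length false, none, none)).1.count true : Nat) : Int) = _
    rw [pvCount_getD, hlen]
    congr 1
    apply List.countP_congr
    intro i hi
    rw [hret i (List.mem_range.1 hi), pvInv]
    have d1 : decide (i < a.length) = true := by simp [List.mem_range.1 hi]
    have d2 : decide (a.length - a.length ≤ i) = true := by simp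
    rw [d1, d2, Bool.true_and, Bool.true_and]
  have hL : a.foldl pvStepB (0, none)
      = ((((pvLmask none a).count true : Nat) : Int), a.foldl pvMstep none) := by
    rw [pvFoldB]; simp
  have hR : a.reverse.foldl pvStepB (0, none)
      = ((((pvLmask none a.reverse).count true : Nat) : Int), a.reverse.foldl pvMstep none) := by
    rw [pvFoldB]; simp
  have hLc : (pvLmask none a).count true = (List.range a.length).countP (fun j => pvLp a j) := by
    rw [pvCount_getD, pvLmask_length]
    rfl
  have hRc : (pvLmask none a.reverse).count true
      = (List.range a.length).countP (fun j => pvRp a j) := by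
    rw [pvCount_getD, pvLmask_length, List.length_reverse,
      pvCountP_reflect a.length (fun i => (pvLmask none a.reverse).getD i false)]
    rfl
  have hB : solution_alt a =
      (((List.range a.length).countP (fun j => pvLp a j) : Nat) : Int)
      + (((List.range a.length).countP (fun j => pvRp a j) : Nat) : Int)
      - (match a.foldl pvMstep none with
         | none => (0 : Int)
         | some v => if PySem.List.count a v == 1 then (1 : Int) else 0) := by
    show (a.foldl pvStepB (0, none)).1 + (a.reverse.foldl pvStepB (0, none)).1
        - (match (a.foldl pvStepB (0, none)).2 with
           | none => (0 : Int)
           | some v => if PySem.List.count a v == 1 then (1 : Int) else 0) = _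
    rw [hL, hR, hLc, hRc]
  have hIE := pvCount_or_and (List.range a.length) (fun j => pvLp a j) (fun j => pvRp a j)
  have hOv := pvOverlap a
  rw [hA, hB, ← hOv]
  omega

-- ===== VERDICT (by name: the statement is the Claim_ definition above) =====
theorem solution_spec : Claim_equal_solution := by
  intro a _
  unfold Spec_solution
  exact pvMain a
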